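-- pv_equiv track=rewrite | github.com/adrianyaniri/estructuraDatos | recursividad.py | granosTotalEnTablero
-- ===== SOURCE A (Python) =====
-- def granosEnCasillero(nroCasillero):
--     cant = None
--     if nroCasillero > 0 :
--         if nroCasillero == 1:
--             cant = 1
--         else :
--             cant = granosEnCasillero(nroCasillero - 1) * 2
--     else:
--         raise Exception('numero no valido')
--
--     return cant
--
-- def  granosTotalEnTablero(casilleros):
--     cant: None
--     if casilleros > 0:
--         if casilleros == 1:
--             cant = granosEnCasillero(casilleros)
--         else:
--             cant = granosEnCasillero(casilleros) + granosTotalEnTablero(casilleros -1)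
--     else:
--         raise Exception(' no valido')
--     return cant
-- ===== SOURCE B (Python) =====
-- def granosTotalEnTablero(casilleros):
--     if casilleros <= 0:
--         raise Exception(' no valido')
--     return 2 ** casilleros - 1
-- ===== Notes on version B (the rewrite author's own statement) =====
-- stated objective: faster
-- what changed: Replaced the doubly-recursive summation of doubling grain counts with the closed form 2**casilleros - 1.
import Mathlib
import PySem

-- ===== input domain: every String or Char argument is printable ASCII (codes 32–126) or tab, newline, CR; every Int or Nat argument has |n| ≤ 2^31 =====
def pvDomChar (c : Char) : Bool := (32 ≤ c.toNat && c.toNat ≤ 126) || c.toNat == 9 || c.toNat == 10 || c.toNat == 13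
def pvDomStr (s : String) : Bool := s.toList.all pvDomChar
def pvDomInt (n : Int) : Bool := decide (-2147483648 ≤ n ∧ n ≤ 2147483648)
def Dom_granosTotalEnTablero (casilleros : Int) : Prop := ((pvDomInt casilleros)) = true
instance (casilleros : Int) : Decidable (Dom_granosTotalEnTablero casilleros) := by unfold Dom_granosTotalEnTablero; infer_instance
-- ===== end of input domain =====

-- B replaces A's double recursion (per-square doubling + running total) with the closed form 2^casilleros - 1: asymptotically faster.


-- ===== PORT A =====
-- raises (excluded by Pre_) are represented by 0
def granosEnCasillero (nroCasillero : Int) : Int :=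
  if nroCasillero > 0 then
    if nroCasillero = 1 then 1
    else granosEnCasillero (nroCasillero - 1) * 2
  else 0
termination_by nroCasillero.toNat
decreasing_by omega

def granosTotalEnTablero (casilleros : Int) : Int :=
  if casilleros > 0 then
    if casilleros = 1 then granosEnCasillero casilleros
    else granosEnCasillero casilleros + granosTotalEnTablero (casilleros - 1)
  else 0
termination_by casilleros.toNat
decreasing_by omega

-- ===== PORT B =====
def granosTotalEnTablero_alt (casilleros : Int) : Int :=
  if casilleros ≤ 0 then 0   -- B raises here; excluded by Pre_
  else 2 ^ casilleros.toNat - 1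

-- ===== PRECONDITION & SPEC =====
-- Pre_ excludes casilleros ≤ 0, where the Python A raises Exception(' no valido').
def Pre_granosTotalEnTablero (casilleros : Int) : Prop := 0 < casilleros
instance (casilleros : Int) : Decidable (Pre_granosTotalEnTablero casilleros) := by unfold Pre_granosTotalEnTablero; infer_instance
def pvWitness_granosTotalEnTablero : Int := 3

def Spec_granosTotalEnTablero (casilleros : Int) (out : Int) : Prop := out = granosTotalEnTablero_alt casilleros
instance (casilleros : Int) (out : Int) : Decidable (Spec_granosTotalEnTablero casilleros out) := by unfold Spec_granosTotalEnTablero; infer_instance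

-- ===== CLAIM (what is proved, stated in full; the proofs are below) =====
def Claim_equal_granosTotalEnTablero : Prop := ∀ (casilleros : Int), Dom_granosTotalEnTablero casilleros → Pre_granosTotalEnTablero casilleros → Spec_granosTotalEnTablero casilleros (granosTotalEnTablero casilleros)

-- ===== LEMMAS AND PROOFS =====
theorem granosEnCasillero_succ (k : Nat) : granosEnCasillero ((k : Int) + 1) = 2 ^ k := by
  induction k with
  | zero => unfold granosEnCasillero; norm_num
  | succ m ih =>
    unfold granosEnCasillero
    rw [if_pos (by positivity), if_neg (by omega)]
    push_cast
    have : ((m : Int) + 1 + 1 - 1) = (m : Int) + 1 := by ring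
    rw [this, ih]
    ring

theorem granosTotal_succ (k : Nat) : granosTotalEnTablero ((k : Int) + 1) = 2 ^ (k + 1) - 1 := by
  induction k with
  | zero =>
    unfold granosTotalEnTablero
    have := granosEnCasillero_succ 0
    norm_num at this ⊢
    omega
  | succ m ih =>
    unfold granosTotalEnTablero
    rw [if_pos (by positivity), if_neg (by omega)]
    push_cast
    have h1 : ((m : Int) + 1 + 1 - 1) = (m : Int) + 1 := by ring
    have h2 : granosEnCasillero ((m : Int) + 1 + 1) = 2 ^ (m + 1) := by
      have : ((m : Int) + 1 + 1) = (((m + 1 : Nat) : Int) + 1) := by push_cast; ring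
      rw [this, granosEnCasillero_succ]
    rw [h1, h2, ih]
    ring

theorem granosTotal_eq (n : Int) (h : 0 < n) : granosTotalEnTablero n = 2 ^ n.toNat - 1 := by
  have hn : n = ((n.toNat - 1 : Nat) : Int) + 1 := by omega
  rw [hn, granosTotal_succ]
  congr 2

-- ===== VERDICT (by name: the statement is the Claim_ definition above) =====
theorem granosTotalEnTablero_spec : Claim_equal_granosTotalEnTablero := by
  intro c _ hpre
  have hc : 0 < c := hpre
  unfold Spec_granosTotalEnTablero granosTotalEnTablero_alt
  rw [if_neg (by omega), granosTotal_eq c hc]
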